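-- pv_equiv track=rewrite | github.com/TzorAL/meteo-ics-feed | scripts/generate_ics.py | fold_line
-- ===== SOURCE A (Python) =====
-- def fold_line(line: str, max_length: int = 75) -> str:
--     """
--     Fold a line according to RFC 5545: lines longer than max_length
--     are split with CRLF followed by a single space.
--     """
--     if len(line.encode("utf-8")) <= max_length:
--         return line
--
--     # For simplicity, we'll fold at character boundaries (not octet-perfect)
--     # since most weather data is ASCII
--     folded_lines = []
--     current_line = ""
--
--     for char in line:
--         test_line = current_line + char
--         if len(test_line.encode("utf-8")) > max_length:
--             folded_lines.append(current_line)
--             current_line = " " + char  # Continuation line starts with space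
--         else:
--             current_line = test_line
--
--     if current_line:
--         folded_lines.append(current_line)
--
--     return "\r\n".join(folded_lines)
-- ===== SOURCE B (Python) =====
-- def fold_line(line: str, max_length: int = 75) -> str:
--     """Fold per RFC 5545 by slicing fixed-size chunks instead of growing a char buffer."""
--     if len(line.encode("utf-8")) <= max_length:
--         return line
--     head = max(max_length, 0)        # chars in the first segment
--     step = max(max_length - 1, 1)    # content chars per continuation (space costs one)
--     parts = [line[:head]]
--     i = head
--     while i < len(line):
--         parts.append(" " + line[i:i + step])
--         i += step
--     return "\r\n".join(parts)
-- ===== Notes on version B (the rewrite author's own statement) =====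
-- stated objective: faster
-- what changed: Replaces A's per-character growing-buffer fold (which re-encodes the whole buffer for every character) with arithmetic chunking: B computes the first-segment width max(max_length,0) and the constant continuation width max(max_length-1,1) once and emits string slices in a single index loop.
import Mathlib
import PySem

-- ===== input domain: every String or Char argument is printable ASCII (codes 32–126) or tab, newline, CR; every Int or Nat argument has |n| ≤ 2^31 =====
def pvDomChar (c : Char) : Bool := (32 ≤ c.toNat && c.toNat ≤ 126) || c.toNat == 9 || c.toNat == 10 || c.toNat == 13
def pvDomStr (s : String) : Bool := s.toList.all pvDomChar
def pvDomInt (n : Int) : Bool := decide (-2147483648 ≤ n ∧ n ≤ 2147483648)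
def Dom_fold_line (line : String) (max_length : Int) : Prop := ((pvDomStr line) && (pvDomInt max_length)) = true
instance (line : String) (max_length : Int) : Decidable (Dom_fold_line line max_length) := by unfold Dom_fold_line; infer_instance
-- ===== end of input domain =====

-- B replaces A's per-character growing-buffer fold with arithmetic chunking (constant
-- first-segment and continuation widths, one slice-emitting loop); same return value.

-- ===== PORT A =====
-- len(x.encode("utf-8")) is ported as the character count: exact on the ASCII domain Dom_fold_line.
def foldStepA (max_length : Int) (st : List (List Char) × List Char) (c : Char) :
    List (List Char) × List Char :=
  let test_line := st.2 ++ [c]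
  if (test_line.length : Int) > max_length then
    (st.1 ++ [st.2], [' ', c])
  else
    (st.1, test_line)

def foldFinishA (st : List (List Char) × List Char) : List (List Char) :=
  if st.2.isEmpty then st.1 else st.1 ++ [st.2]

def fold_line (line : String) (max_length : Int) : String :=
  if (PySem.Chars.len line.toList : Int) ≤ max_length then line
  else
    String.ofList (PySem.Chars.join ['\r', '\n']
      (foldFinishA (line.toList.foldl (foldStepA max_length) ([], []))))

-- ===== PORT B =====
-- the 'while i < len(line)' loop of Source B; line[i:i+step] = (drop i).take step (nonneg bounds).
-- 'max step 1' in the recursive call only witnesses termination: at every call site step ≥ 1.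
def bLoop (L : List Char) (step : Nat) (i : Nat) : List (List Char) :=
  if i < L.length then
    (' ' :: (L.drop i).take step) :: bLoop L step (i + max step 1)
  else []
termination_by L.length - i
decreasing_by omega

def fold_line_alt (line : String) (max_length : Int) : String :=
  if (PySem.Chars.len line.toList : Int) ≤ max_length then line
  else
    String.ofList (PySem.Chars.join ['\r', '\n']
      (line.toList.take (max max_length 0).toNat ::
        bLoop line.toList (max (max_length - 1) 1).toNat (max max_length 0).toNat))

-- ===== PRECONDITION & SPEC =====
def Spec_fold_line (line : String) (max_length : Int) (out : String) : Prop := out = fold_line_alt line max_length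
instance (line : String) (max_length : Int) (out : String) : Decidable (Spec_fold_line line max_length out) := by unfold Spec_fold_line; infer_instance

-- ===== CLAIM (what is proved, stated in full; the proofs are below) =====
def Claim_equal_fold_line : Prop := ∀ (line : String) (max_length : Int), Dom_fold_line line max_length → Spec_fold_line line max_length (fold_line line max_length)

-- ===== LEMMAS AND PROOFS =====

-- greedy continuation chunks of width s (content char c plus s-1 more chars each)
def chunk (s : Nat) : List Char → List (List Char)
  | [] => []
  | c :: rest => (' ' :: c :: rest.take (s - 1)) :: chunk s (rest.drop (s - 1))
termination_by cs => cs.length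
decreasing_by simp

theorem chunk_nil (s : Nat) : chunk s [] = [] := by rw [chunk.eq_def]

theorem chunk_cons (s : Nat) (c : Char) (rest : List Char) :
    chunk s (c :: rest) = (' ' :: c :: rest.take (s - 1)) :: chunk s (rest.drop (s - 1)) := by
  rw [chunk.eq_def]

theorem step_pos (max_length : Int) : 1 ≤ (max (max_length - 1) 1).toNat := by
  have h : (1 : Int) ≤ max (max_length - 1) 1 := le_max_right _ _
  have := Int.toNat_le_toNat h
  simpa using this

theorem step_facts (max_length : Int) :
    (((max (max_length - 1) 1).toNat : Int) = max_length - 1 ∧ 2 ≤ max_length) ∨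
      (((max (max_length - 1) 1).toNat : Int) = 1 ∧ max_length ≤ 2) := by
  rcases le_total (max_length - 1) 1 with h | h
  · right
    rw [max_eq_right h]
    constructor
    · simp
    · omega
  · left
    rw [max_eq_left h, Int.toNat_of_nonneg (by omega)]
    omega

theorem bLoop_eq_chunk (L : List Char) (s : Nat) (hs : 1 ≤ s) :
    ∀ i, bLoop L s i = chunk s (L.drop i) := by
  intro i
  induction hn : L.length - i using Nat.strong_induction_on generalizing i with
  | _ n ih =>
    rw [bLoop]
    by_cases h : i < L.length
    · have hdrop : L.drop i = L[i] :: L.drop (i + 1) := List.drop_eq_getElem_cons h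
      rw [if_pos h, hdrop, chunk_cons]
      congr 1
      · obtain ⟨t, rfl⟩ : ∃ t, s = t + 1 := ⟨s - 1, by omega⟩
        rw [List.take_succ_cons]
        simp
      · rw [List.drop_drop, Nat.max_eq_left hs]
        have harg : i + 1 + (s - 1) = i + s := by omega
        rw [harg]
        exact ih (L.length - (i + s)) (by omega) (i + s) rfl
    · rw [if_neg h, List.drop_eq_nil_of_le (by omega), chunk_nil]

theorem fillA (max_length : Int) :
    ∀ (cs : List Char) (segs : List (List Char)) (cur : List Char),
      ((cur.length : Int) + cs.length ≤ max_length) →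
      cs.foldl (foldStepA max_length) (segs, cur) = (segs, cur ++ cs) := by
  intro cs
  induction cs with
  | nil => intro segs cur _; simp
  | cons c cs ih =>
    intro segs cur hle
    simp only [List.length_cons, Nat.cast_add, Nat.cast_one] at hle
    have hfit : ¬ (((cur ++ [c]).length : Int) > max_length) := by
      simp only [List.length_append, List.length_cons, List.length_nil, Nat.cast_add,
        Nat.cast_one, Nat.cast_zero]
      omega
    simp only [List.foldl_cons, foldStepA, if_neg hfit]
    rw [ih segs (cur ++ [c]) (by
      simp only [List.length_append, List.length_cons, List.length_nil, Nat.cast_add,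
        Nat.cast_one, Nat.cast_zero]
      omega)]
    simp

theorem contA_gen (max_length : Int) (s : Nat) (hs1 : 1 ≤ s)
    (hseq : (((s : Nat) : Int) = max_length - 1 ∧ 2 ≤ max_length) ∨
      (((s : Nat) : Int) = 1 ∧ max_length ≤ 2)) :
    ∀ (cs : List Char) (segs : List (List Char)) (c : Char),
      foldFinishA (cs.foldl (foldStepA max_length) (segs, [' ', c])) =
        segs ++ chunk s (c :: cs) := by
  intro cs
  induction hn : cs.length using Nat.strong_induction_on generalizing cs with
  | _ n ih =>
    intro segs c
    cases cs with
    | nil =>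
      rw [List.foldl_nil, chunk_cons, List.take_nil, List.drop_nil, chunk_nil]
      simp [foldFinishA]
    | cons c0 rest =>
      by_cases hfits : ((2 : Int) + ((c0 :: rest).length : Int) ≤ max_length)
      · -- the whole continuation fits in one chunk
        rw [fillA max_length (c0 :: rest) segs [' ', c] (by
          simp only [List.length_cons, List.length_nil, Nat.cast_add, Nat.cast_one, Nat.cast_zero] at hfits ⊢
          rcases hseq with ⟨h, h'⟩ | ⟨h, h'⟩ <;> omega)]
        have hlen : (c0 :: rest).length ≤ s - 1 := by
          simp only [List.length_cons, Nat.cast_add, Nat.cast_one] at hfits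
          simp only [List.length_cons]
          rcases hseq with ⟨h, h'⟩ | ⟨h, h'⟩ <;> omega
        rw [chunk_cons, List.take_of_length_le hlen, List.drop_eq_nil_of_le hlen, chunk_nil]
        simp [foldFinishA]
      · -- the continuation overflows: it takes exactly s - 1 more chars, then a new chunk starts
        have hlen2 : s - 1 < (c0 :: rest).length := by
          simp only [List.length_cons, Nat.cast_add, Nat.cast_one] at hfits
          simp only [List.length_cons]
          rcases hseq with ⟨h, h'⟩ | ⟨h, h'⟩ <;> omega
        have hsplit : c0 :: rest =
            (c0 :: rest).take (s - 1) ++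
              (c0 :: rest)[s - 1] :: (c0 :: rest).drop (s - 1 + 1) := by
          conv_lhs => rw [← List.take_append_drop (s - 1) (c0 :: rest)]
          rw [List.drop_eq_getElem_cons hlen2]
        have hfold1 : ((c0 :: rest).take (s - 1)).foldl (foldStepA max_length)
            (segs, [' ', c]) = (segs, [' ', c] ++ (c0 :: rest).take (s - 1)) := by
          by_cases hM2 : 2 ≤ max_length
          · refine fillA max_length _ segs [' ', c] ?_
            rw [List.length_take_of_le (Nat.le_of_lt hlen2)]
            simp only [List.length_cons, List.length_nil, Nat.cast_add, Nat.cast_one, Nat.cast_zero]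
            rcases hseq with ⟨h, h'⟩ | ⟨h, h'⟩ <;> omega
          · have hs1' : s = 1 := by rcases hseq with ⟨h, h'⟩ | ⟨h, h'⟩ <;> omega
            rw [hs1']
            simp
        have hover : (((([' ', c] ++ (c0 :: rest).take (s - 1)) ++
            [(c0 :: rest)[s - 1]]).length : Int) > max_length) := by
          rw [List.length_append, List.length_append, List.length_take_of_le (Nat.le_of_lt hlen2)]
          simp only [List.length_cons, List.length_nil, Nat.cast_add, Nat.cast_one, Nat.cast_zero]
          rcases hseq with ⟨h, h'⟩ | ⟨h, h'⟩ <;> omega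
        calc foldFinishA ((c0 :: rest).foldl (foldStepA max_length) (segs, [' ', c]))
            = foldFinishA (((c0 :: rest).drop (s - 1 + 1)).foldl (foldStepA max_length)
                (segs ++ [[' ', c] ++ (c0 :: rest).take (s - 1)], [' ', (c0 :: rest)[s - 1]])) := by
              conv_lhs => rw [hsplit]
              rw [List.foldl_append, hfold1, List.foldl_cons]
              simp only [foldStepA, if_pos hover]
          _ = (segs ++ [[' ', c] ++ (c0 :: rest).take (s - 1)]) ++
                chunk s ((c0 :: rest)[s - 1] :: (c0 :: rest).drop (s - 1 + 1)) := by
              refine ih ((c0 :: rest).drop (s - 1 + 1)).length ?_ _ rfl _ _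
              rw [List.length_drop]
              simp only [List.length_cons] at hn ⊢
              rcases hseq with ⟨h, h'⟩ | ⟨h, h'⟩ <;> omega
          _ = segs ++ chunk s (c :: c0 :: rest) := by
              rw [chunk_cons s c (c0 :: rest), List.drop_eq_getElem_cons hlen2]
              simp

theorem segsA_gen (max_length : Int) (h0 s : Nat) (hs1 : 1 ≤ s)
    (hseq : (((s : Nat) : Int) = max_length - 1 ∧ 2 ≤ max_length) ∨
      (((s : Nat) : Int) = 1 ∧ max_length ≤ 2))
    (hh0 : (((h0 : Nat) : Int) = max_length ∧ 0 ≤ max_length) ∨ (h0 = 0 ∧ max_length ≤ 0))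
    (L : List Char) (hgt : (L.length : Int) > max_length) (hL : L ≠ []) :
    foldFinishA (L.foldl (foldStepA max_length) ([], [])) =
      L.take h0 :: chunk s (L.drop h0) := by
  have hpos : 0 < L.length := List.length_pos_iff.mpr hL
  have hlt : h0 < L.length := by
    rcases hh0 with ⟨h, h'⟩ | ⟨h, h'⟩ <;> omega
  have hsplit : L = L.take h0 ++ L[h0] :: L.drop (h0 + 1) := by
    conv_lhs => rw [← List.take_append_drop h0 L]
    rw [List.drop_eq_getElem_cons hlt]
  have hfold1 : (L.take h0).foldl (foldStepA max_length) ([], []) =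
      ([], ([] : List Char) ++ L.take h0) := by
    by_cases hM0 : 0 ≤ max_length
    · refine fillA max_length _ [] [] ?_
      rw [List.length_take_of_le (Nat.le_of_lt hlt)]
      simp only [List.length_nil, Nat.cast_zero]
      rcases hh0 with ⟨h, h'⟩ | ⟨h, h'⟩ <;> omega
    · have h00 : h0 = 0 := by
        rcases hh0 with ⟨h, h'⟩ | ⟨h, h'⟩ <;> omega
      rw [h00]
      simp
  have hover : (((([] : List Char) ++ L.take h0) ++ [L[h0]]).length : Int) > max_length := by
    rw [List.length_append, List.length_append, List.length_take_of_le (Nat.le_of_lt hlt)]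
    simp only [List.length_cons, List.length_nil, Nat.cast_add, Nat.cast_one, Nat.cast_zero]
    rcases hh0 with ⟨h, h'⟩ | ⟨h, h'⟩ <;> omega
  conv_lhs => rw [hsplit]
  rw [List.foldl_append, hfold1, List.foldl_cons]
  simp only [foldStepA, if_pos hover]
  rw [contA_gen max_length s hs1 hseq (L.drop (h0 + 1)) ([] ++ [[] ++ L.take h0]) L[h0]]
  rw [show L[h0] :: L.drop (h0 + 1) = L.drop h0 from (List.drop_eq_getElem_cons hlt).symm]
  simp

theorem head_facts (max_length : Int) :
    ((((max max_length 0).toNat : Nat) : Int) = max_length ∧ 0 ≤ max_length) ∨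
      ((max max_length 0).toNat = 0 ∧ max_length ≤ 0) := by
  rcases le_total max_length 0 with h | h
  · right
    rw [max_eq_right h]
    exact ⟨rfl, h⟩
  · left
    rw [max_eq_left h, Int.toNat_of_nonneg h]
    exact ⟨rfl, h⟩

-- ===== VERDICT (by name: the statement is the Claim_ definition above) =====
theorem fold_line_spec : Claim_equal_fold_line := by
  intro line max_length _
  unfold Spec_fold_line fold_line fold_line_alt
  by_cases hg : (PySem.Chars.len line.toList : Int) ≤ max_length
  · rw [if_pos hg, if_pos hg]
  · rw [if_neg hg, if_neg hg]
    have hgt : ((line.toList.length : Int)) > max_length := by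
      simp only [PySem.Chars.len_eq] at hg
      omega
    by_cases hL : line.toList = []
    · rw [hL]
      rw [bLoop]
      simp [foldFinishA, PySem.Chars.join]
      decide
    · rw [segsA_gen max_length (max max_length 0).toNat (max (max_length - 1) 1).toNat
        (step_pos max_length) (step_facts max_length) (head_facts max_length)
        line.toList hgt hL,
        bLoop_eq_chunk line.toList (max (max_length - 1) 1).toNat (step_pos max_length)]
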